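-- pv_equiv track=rewrite | github.com/Cameron-D/openpose-ptz-control | pose.py | calculate_boundaries
-- ===== SOURCE A (Python) =====
-- from enum import IntEnum
--
-- class Edge(IntEnum):
--     LEFT = 0
--     TOP = 1
--     RIGHT = 2
--     BOTTOM = 3
--
-- def calculate_boundaries(bounding, regions):
--     for (x, y, w, h) in regions:
--         if x < bounding[Edge.LEFT]:
--             bounding[Edge.LEFT] = x
--         if y < bounding[Edge.TOP]:
--             bounding[Edge.TOP] = y
--         if x + w > bounding[Edge.RIGHT]:
--             bounding[Edge.RIGHT] = x + w
--         if y + h > bounding[Edge.BOTTOM]: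
--             bounding[Edge.BOTTOM] = y + h
--
--     return bounding
-- ===== SOURCE B (Python) =====
-- def calculate_boundaries(bounding, regions):
--     if regions:
--         bounding[0] = min([bounding[0]] + [x for (x, y, w, h) in regions])
--         bounding[1] = min([bounding[1]] + [y for (x, y, w, h) in regions])
--         bounding[2] = max([bounding[2]] + [x + w for (x, y, w, h) in regions])
--         bounding[3] = max([bounding[3]] + [y + h for (x, y, w, h) in regions])
--     return bounding
-- ===== Notes on version B (the rewrite author's own statement) =====
-- stated objective: idiomatic
-- what changed: Replaces the single loop of interleaved per-edge conditionals with four whole-list min/max reductions, one per edge, folding in the current bounding value.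
import Mathlib
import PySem

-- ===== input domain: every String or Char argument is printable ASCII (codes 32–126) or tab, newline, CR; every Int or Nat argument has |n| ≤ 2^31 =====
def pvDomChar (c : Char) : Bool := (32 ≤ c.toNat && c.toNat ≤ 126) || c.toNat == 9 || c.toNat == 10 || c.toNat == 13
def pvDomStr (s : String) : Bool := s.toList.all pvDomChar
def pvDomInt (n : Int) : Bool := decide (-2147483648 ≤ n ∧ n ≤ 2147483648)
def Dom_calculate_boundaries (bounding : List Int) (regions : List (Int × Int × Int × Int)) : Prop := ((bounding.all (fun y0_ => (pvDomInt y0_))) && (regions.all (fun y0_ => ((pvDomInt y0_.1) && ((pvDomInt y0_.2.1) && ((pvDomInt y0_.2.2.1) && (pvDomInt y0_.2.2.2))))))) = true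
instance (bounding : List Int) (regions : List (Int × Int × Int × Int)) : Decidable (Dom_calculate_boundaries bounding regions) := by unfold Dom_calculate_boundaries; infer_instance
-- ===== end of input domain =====

-- B replaces A's loop of interleaved per-edge conditionals by four whole-list
-- min/max reductions (one per edge), folding in the current bounding value;
-- equivalence is about the RETURN value only (the Python versions mutate `bounding` in place).


-- ===== PORT A =====
-- loop body: the four interleaved conditional updates (Edge.LEFT=0, TOP=1, RIGHT=2, BOTTOM=3);
-- under Pre_ the indices 0..3 are in range, so getD/set are exact for Python's bounding[i]
def cbStepA (b : List Int) (r : Int × Int × Int × Int) : List Int :=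
  let (x, y, w, h) := r
  let b := if x < b.getD 0 0 then b.set 0 x else b
  let b := if y < b.getD 1 0 then b.set 1 y else b
  let b := if x + w > b.getD 2 0 then b.set 2 (x + w) else b
  if y + h > b.getD 3 0 then b.set 3 (y + h) else b

def calculate_boundaries (bounding : List Int) (regions : List (Int × Int × Int × Int)) : List Int :=
  regions.foldl cbStepA bounding

-- ===== PORT B =====
-- four reductions, one per edge; Python's min/max over a nonempty int list = foldl min/max
def calculate_boundaries_alt (bounding : List Int) (regions : List (Int × Int × Int × Int)) : List Int :=
  if regions.isEmpty then bounding
  else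
    let b0 := (regions.map (fun r => r.1)).foldl min (bounding.getD 0 0)
    let b1 := (regions.map (fun r => r.2.1)).foldl min (bounding.getD 1 0)
    let b2 := (regions.map (fun r => r.1 + r.2.2.1)).foldl max (bounding.getD 2 0)
    let b3 := (regions.map (fun r => r.2.1 + r.2.2.2)).foldl max (bounding.getD 3 0)
    (((bounding.set 0 b0).set 1 b1).set 2 b2).set 3 b3

-- ===== PRECONDITION & SPEC =====
-- Pre_ excludes exactly the inputs where both Pythons raise IndexError:
-- a nonempty `regions` with `bounding` shorter than 4 entries.
def Pre_calculate_boundaries (bounding : List Int) (regions : List (Int × Int × Int × Int)) : Prop :=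
  regions = [] ∨ 4 ≤ bounding.length
instance (bounding : List Int) (regions : List (Int × Int × Int × Int)) : Decidable (Pre_calculate_boundaries bounding regions) := by unfold Pre_calculate_boundaries; infer_instance
def pvWitness_calculate_boundaries : List Int × (List (Int × Int × Int × Int)) :=
  ([10, 10, 20, 20], [(5, 6, 30, 2)])
def Spec_calculate_boundaries (bounding : List Int) (regions : List (Int × Int × Int × Int)) (out : List Int) : Prop := out = calculate_boundaries_alt bounding regions
instance (bounding : List Int) (regions : List (Int × Int × Int × Int)) (out : List Int) : Decidable (Spec_calculate_boundaries bounding regions out) := by unfold Spec_calculate_boundaries; infer_instance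

-- ===== CLAIM (what is proved, stated in full; the proofs are below) =====
def Claim_equal_calculate_boundaries : Prop := ∀ (bounding : List Int) (regions : List (Int × Int × Int × Int)), Dom_calculate_boundaries bounding regions → Pre_calculate_boundaries bounding regions → Spec_calculate_boundaries bounding regions (calculate_boundaries bounding regions)

-- ===== LEMMAS AND PROOFS =====

-- one step of A on a ≥4-element list is pointwise min/max on the first four entries
theorem cbStepA_cons (a c d e : Int) (t : List Int) (r : Int × Int × Int × Int) :
    cbStepA (a :: c :: d :: e :: t) r =
      min a r.1 :: min c r.2.1 :: max d (r.1 + r.2.2.1) :: max e (r.2.1 + r.2.2.2) :: t := by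
  obtain ⟨x, y, w, h⟩ := r
  simp only [cbStepA, List.getD, List.set]
  split_ifs <;> simp_all <;> omega

theorem cbFoldA_cons (rs : List (Int × Int × Int × Int)) (a c d e : Int) (t : List Int) :
    rs.foldl cbStepA (a :: c :: d :: e :: t) =
      (rs.foldl (fun acc r => min acc r.1) a) ::
      (rs.foldl (fun acc r => min acc r.2.1) c) ::
      (rs.foldl (fun acc r => max acc (r.1 + r.2.2.1)) d) ::
      (rs.foldl (fun acc r => max acc (r.2.1 + r.2.2.2)) e) :: t := by
  induction rs generalizing a c d e with
  | nil => rfl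
  | cons r rs ih => simp [List.foldl_cons, cbStepA_cons, ih]

-- ===== VERDICT (by name: the statement is the Claim_ definition above) =====
theorem calculate_boundaries_spec : Claim_equal_calculate_boundaries := by
  intro bounding regions _ hpre
  unfold Spec_calculate_boundaries calculate_boundaries calculate_boundaries_alt
  cases regions with
  | nil => simp
  | cons r rs =>
    rcases hpre with h | h
    · exact absurd h (by simp)
    · match bounding, h with
      | a :: c :: d :: e :: t, _ =>
        rw [List.foldl_cons, cbStepA_cons, cbFoldA_cons]
        simp [List.foldl_map, List.set]
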